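-- pv_equiv track=rewrite | github.com/eclipse-du/nlp_book | ch12/framework/parse_rule_loader.py | count_parentheses
-- ===== SOURCE A (Python) =====
-- def count_parentheses(pattern_string):
--     ''' 统计括号对的数量
--     :param pattern_string:  字符串
--     :return: int 括号对不匹配返回 -1，否则返回括号对数
--     '''
--     layer = 0
--     group_count = 0
--     last_ch = ' '
--     for ch in pattern_string:
--         if last_ch == '\\':
--             last_ch = ch
--             continue
--         if ch == '(':
--             layer += 1
--         elif ch == ')':
--             layer -= 1
--             group_count += 1
--         last_ch = ch
--     if layer != 0:
--         return -1
--     return group_count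
-- ===== SOURCE B (Python) =====
-- def count_parentheses(pattern_string):
--     ''' 统计括号对的数量（split-based re-implementation） '''
--     segs = pattern_string.split('\\')
--     active = segs[0] + ''.join(seg[1:] for seg in segs[1:])
--     opens = active.count('(')
--     closes = active.count(')')
--     return closes if opens == closes else -1
-- ===== Notes on version B (the rewrite author's own statement) =====
-- stated objective: faster
-- what changed: Replaces the stateful per-character escape-tracking loop (layer/group_count/last_ch) with split('\') — each non-first segment's first character is the escaped one and is sliced off — joining the remainders and comparing two count() aggregates; the per-character Python loop disappears into bulk str.split/str.count operations.
import Mathlib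
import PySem

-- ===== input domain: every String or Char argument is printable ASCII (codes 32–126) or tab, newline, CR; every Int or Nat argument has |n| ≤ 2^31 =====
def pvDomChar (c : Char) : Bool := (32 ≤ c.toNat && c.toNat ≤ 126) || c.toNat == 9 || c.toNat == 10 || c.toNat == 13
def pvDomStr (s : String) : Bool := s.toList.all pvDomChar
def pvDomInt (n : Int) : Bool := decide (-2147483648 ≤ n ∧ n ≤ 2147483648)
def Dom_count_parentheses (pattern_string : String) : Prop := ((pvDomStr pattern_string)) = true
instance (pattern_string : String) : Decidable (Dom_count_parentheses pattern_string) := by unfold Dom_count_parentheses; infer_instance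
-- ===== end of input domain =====

-- B replaces A's stateful escape-tracking pass by splitting on backslash, joining each segment's tail, and comparing two counts (objective: simpler).


-- ===== PORT A =====
-- the for-loop over (layer, group_count, last_ch)
def cpLoop : List Char → Int × Int × Char → Int × Int × Char
  | [], st => st
  | ch :: t, (layer, gc, last) =>
    if last == '\\' then cpLoop t (layer, gc, ch)
    else if ch == '(' then cpLoop t (layer + 1, gc, ch)
    else if ch == ')' then cpLoop t (layer - 1, gc + 1, ch)
    else cpLoop t (layer, gc, ch)

def count_parentheses (pattern_string : String) : Int :=
  let st := cpLoop pattern_string.toList (0, 0, ' ')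
  if st.1 ≠ 0 then -1 else st.2.1

-- ===== PORT B =====
def count_parentheses_alt (pattern_string : String) : Int :=
  let segs := PySem.Chars.splitOn pattern_string.toList ['\\']
  let active := segs.headD [] ++ ((segs.tail).map (fun seg => PySem.Chars.slice seg (some 1) none)).flatten
  let opens : Int := (PySem.Chars.count active ['('] : Int)
  let closes : Int := (PySem.Chars.count active [')'] : Int)
  if opens == closes then closes else -1

-- ===== PRECONDITION & SPEC =====
def Spec_count_parentheses (pattern_string : String) (out : Int) : Prop := out = count_parentheses_alt pattern_string
instance (pattern_string : String) (out : Int) : Decidable (Spec_count_parentheses pattern_string out) := by unfold Spec_count_parentheses; infer_instance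

-- ===== CLAIM (what is proved, stated in full; the proofs are below) =====
def Claim_equal_count_parentheses : Prop := ∀ (pattern_string : String), Dom_count_parentheses pattern_string → Spec_count_parentheses pattern_string (count_parentheses pattern_string)

-- ===== LEMMAS AND PROOFS =====

-- A's active characters, generalized over the previous character
def cpAct (prev : Char) (l : List Char) : List Char :=
  (if prev = '\\' then [] else []) ++
  match l with
  | [] => []
  | c :: t => (if prev = '\\' then [] else [c]) ++ cpAct c t

theorem cpAct_nil (prev : Char) : cpAct prev [] = [] := by
  by_cases h : prev = '\\' <;> simp [cpAct, h]

theorem cpAct_cons (prev c : Char) (t : List Char) :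
    cpAct prev (c :: t) = (if prev = '\\' then [] else [c]) ++ cpAct c t := by
  by_cases h : prev = '\\' <;> simp [cpAct, h]

-- the loop's result in terms of counts over the active list
theorem cpLoop_eq (l : List Char) (prev : Char) (layer gc : Int) :
    (cpLoop l (layer, gc, prev)).1
      = layer + ((cpAct prev l).count '(' : Int) - ((cpAct prev l).count ')' : Int)
    ∧ (cpLoop l (layer, gc, prev)).2.1 = gc + ((cpAct prev l).count ')' : Int) := by
  induction l generalizing prev layer gc with
  | nil => simp [cpLoop, cpAct_nil]
  | cons c t ih =>
    rw [cpAct_cons]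
    by_cases hp : prev = '\\'
    · simp [cpLoop, hp]
      exact ih c layer gc
    · by_cases hc : c = '('
      · have := ih c (layer + 1) gc
        simp [cpLoop, hp, hc] at this ⊢
        constructor
        · rw [this.1]; ring
        · rw [this.2]
      · by_cases hc' : c = ')'
        · have := ih c (layer - 1) (gc + 1)
          simp [cpLoop, hp, hc'] at this ⊢
          constructor
          · rw [this.1]; ring
          · rw [this.2]; ring
        · have := ih c layer gc
          simp [cpLoop, hp, hc, hc'] at this ⊢
          exact this

-- reference recursion for split-on-backslash
def mySplit (cur : List Char) : List Char → List (List Char)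
  | [] => [cur.reverse]
  | c :: t => if c = '\\' then cur.reverse :: mySplit [] t else mySplit (c :: cur) t

theorem splitGo_eq (fuel : Nat) : ∀ (l cur : List Char) (acc : List (List Char)),
    l.length ≤ fuel →
    PySem.Chars.splitOn.go ['\\'] fuel l cur acc = acc.reverse ++ mySplit cur l := by
  induction fuel with
  | zero =>
    intro l cur acc h
    have : l = [] := by cases l <;> simp_all
    subst this
    rw [PySem.Chars.splitOn.go.eq_def]
    simp [mySplit]
  | succ n ih =>
    intro l cur acc h
    cases l with
    | nil =>
      rw [PySem.Chars.splitOn.go.eq_def]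
      simp [mySplit]
    | cons c t =>
      rw [PySem.Chars.splitOn.go.eq_def]
      by_cases hc : c = '\\'
      · simp [List.isPrefixOf, hc, mySplit, ih t [] _ (by simpa using h)]
      · simp [List.isPrefixOf, Ne.symm hc, hc, mySplit, ih t (c :: cur) _ (by simpa using h)]

theorem splitOn_eq (l : List Char) : PySem.Chars.splitOn l ['\\'] = mySplit [] l := by
  unfold PySem.Chars.splitOn
  exact splitGo_eq (l.length + 1) l [] [] (by omega)

theorem countGo_eq (c : Char) (fuel : Nat) : ∀ (l : List Char) (acc : Nat),
    l.length ≤ fuel →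
    PySem.Chars.count.go [c] fuel l acc = acc + l.count c := by
  induction fuel with
  | zero =>
    intro l acc h
    have : l = [] := by cases l <;> simp_all
    subst this
    rw [PySem.Chars.count.go.eq_def]
    simp
  | succ n ih =>
    intro l acc h
    cases l with
    | nil =>
      rw [PySem.Chars.count.go.eq_def]
      simp
    | cons d t =>
      rw [PySem.Chars.count.go.eq_def]
      by_cases hd : c = d
      · subst hd
        have hg := ih t (acc + 1) (by simpa using h)
        simp [List.isPrefixOf, hg]
        omega
      · simp [List.isPrefixOf, hd, Ne.symm hd, ih t acc (by simpa using h)]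

theorem count_single (l : List Char) (c : Char) :
    PySem.Chars.count l [c] = l.count c := by
  rw [show PySem.Chars.count l [c] = PySem.Chars.count.go [c] l.length l 0 from rfl,
    countGo_eq c l.length l 0 le_rfl]
  omega

-- mySplit with a partial current segment, in terms of mySplit []
theorem mySplit_cur (l : List Char) : ∀ cur : List Char,
    mySplit cur l = (cur.reverse ++ (mySplit [] l).headD []) :: (mySplit [] l).tail := by
  induction l with
  | nil => intro cur; simp [mySplit]
  | cons c t ih =>
    intro cur
    by_cases hc : c = '\\'
    · subst hc
      rw [show mySplit cur ('\\' :: t) = cur.reverse :: mySplit [] t by simp [mySplit],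
          show mySplit [] ('\\' :: t) = List.reverse [] :: mySplit [] t by simp [mySplit]]
      simp
    · rw [show mySplit cur (c :: t) = mySplit (c :: cur) t by simp [mySplit, hc],
          show mySplit [] (c :: t) = mySplit [c] t by simp [mySplit, hc],
          ih (c :: cur), ih [c]]
      simp

-- B's active list as a function of the raw character list
def actB (l : List Char) : List Char :=
  (mySplit [] l).headD [] ++ (((mySplit [] l).tail).map List.tail).flatten

-- the "after a backslash" variant: every segment loses its first character
def actJ (l : List Char) : List Char :=
  ((mySplit [] l).map List.tail).flatten

theorem actB_nil : actB [] = [] := by simp [actB, mySplit]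
theorem actJ_nil : actJ [] = [] := by simp [actJ, mySplit]

theorem actB_cons_bs (t : List Char) : actB ('\\' :: t) = actJ t := by
  simp [actB, actJ, mySplit]

theorem actJ_cons_bs (t : List Char) : actJ ('\\' :: t) = actJ t := by
  simp [actJ, mySplit]

theorem actB_cons (c : Char) (t : List Char) (hc : c ≠ '\\') :
    actB (c :: t) = c :: actB t := by
  rw [actB, show mySplit [] (c :: t) = mySplit [c] t by simp [mySplit, hc], mySplit_cur t [c]]
  simp [actB]

theorem actJ_cons (c : Char) (t : List Char) (hc : c ≠ '\\') :
    actJ (c :: t) = actB t := by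
  rw [actJ, show mySplit [] (c :: t) = mySplit [c] t by simp [mySplit, hc], mySplit_cur t [c]]
  simp [actB]

-- counts of any non-backslash character agree between A's active list and B's
theorem count_act (ch : Char) (hch : ch ≠ '\\') (l : List Char) :
    (∀ p, p ≠ '\\' → (cpAct p l).count ch = (actB l).count ch)
    ∧ (cpAct '\\' l).count ch = (actJ l).count ch := by
  induction l with
  | nil => simp [cpAct_nil, actB_nil, actJ_nil]
  | cons c t ih =>
    obtain ⟨ih1, ih2⟩ := ih
    by_cases hc : c = '\\'
    · subst hc
      constructor
      · intro p hp
        rw [cpAct_cons, actB_cons_bs]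
        simp [hp, Ne.symm hch, ih2]
      · rw [cpAct_cons, actJ_cons_bs]
        simpa using ih2
    · constructor
      · intro p hp
        rw [cpAct_cons, actB_cons c t hc]
        simp [hp, List.count_cons, ih1 c hc]
      · rw [cpAct_cons, actJ_cons c t hc]
        simpa using ih1 c hc

-- ===== VERDICT (by name: the statement is the Claim_ definition above) =====
theorem count_parentheses_spec : Claim_equal_count_parentheses := by
  intro s _
  unfold Spec_count_parentheses count_parentheses count_parentheses_alt
  obtain ⟨h1, h2⟩ := cpLoop_eq s.toList ' ' 0 0
  have hsp : ' ' ≠ '\\' := by decide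
  have ho := (count_act '(' (by decide) s.toList).1 ' ' hsp
  have hc := (count_act ')' (by decide) s.toList).1 ' ' hsp
  simp only [PySem.Chars.slice_eq_listSlice, PySem.List.slice_from_one, splitOn_eq,
    count_single]
  rw [show ((mySplit [] s.toList).headD [] ++
        (((mySplit [] s.toList).tail).map List.tail).flatten) = actB s.toList from rfl]
  rw [h1, h2, ho, hc]
  simp only [beq_iff_eq]
  split_ifs <;> omega
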